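-- pv_equiv track=rewrite | github.com/Aurangzebxkhan/pythonhttps---github.com-Aurangzebxkhan-My-python-lab-task | coinFlipStreaks.py | check_streak
-- ===== SOURCE A (Python) =====
-- def check_streak(flips, streak_length):
--     """Check for streaks of 'H' or 'T' of a given length in the list."""
--     current_streak = 1
--     streak_found = False
--     for i in range(1, len(flips)):
--         if flips[i] == flips[i - 1]:
--             current_streak += 1
--             if current_streak == streak_length:
--                 streak_found = True
--                 break
--         else:
--             current_streak = 1
--     return streak_found
-- ===== SOURCE B (Python) =====
-- def check_streak(flips, streak_length):
--     """Return True iff some run of identical consecutive flips is at least streak_length long."""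
--     runs = []  # run-length encoding of flips: [value, length] per maximal run
--     for f in flips:
--         if runs and f == runs[-1][0]:
--             runs[-1][1] += 1
--         else:
--             runs.append([f, 1])
--     return any(length >= streak_length for _, length in runs)
-- ===== Notes on version B (the rewrite author's own statement) =====
-- stated objective: idiomatic
-- what changed: B builds the run-length encoding of the flips in one pass and then tests whether any run length reaches streak_length, instead of A's incremental counter with an exact == test and an early break; Pre_ restricts to the natural domain streak_length >= 1 (a streak length is a positive count; on malformed non-positive lengths A returns False while B's run test answers True on non-empty lists).
-- intended difference: For streak_length = 1 with a non-empty list, A always returns False (its counter starts at 1 and only ever tests equality at 2 or more) even though any single flip is a streak of length 1; B returns True, the intended value. — e.g. on check_streak(["H"], 1): A returns false, B returns true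
-- outside the precondition, e.g. on check_streak(['H'], 0): A returns False, B returns True; on check_streak(['H', 'T'], -2): A returns False, B returns True
import Mathlib
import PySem

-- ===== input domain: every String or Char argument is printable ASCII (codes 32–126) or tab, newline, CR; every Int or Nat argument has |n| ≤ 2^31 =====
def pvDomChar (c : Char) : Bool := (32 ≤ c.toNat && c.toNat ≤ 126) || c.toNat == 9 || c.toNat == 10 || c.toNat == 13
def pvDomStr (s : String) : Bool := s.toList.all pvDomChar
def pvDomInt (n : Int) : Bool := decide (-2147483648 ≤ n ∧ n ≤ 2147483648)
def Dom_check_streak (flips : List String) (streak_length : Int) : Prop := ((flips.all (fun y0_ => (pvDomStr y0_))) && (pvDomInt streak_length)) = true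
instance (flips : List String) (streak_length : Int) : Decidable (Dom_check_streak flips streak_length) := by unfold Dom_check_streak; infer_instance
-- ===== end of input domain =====

-- B builds the run-length encoding of the flips and then tests whether any run length reaches
-- streak_length (idiomatic group-then-test decomposition; same O(n) cost). On streak_length ≤ 1
-- with non-empty input, B returns the intended True where A returns False (see D_ below).

-- ===== PORT A =====
-- literal transliteration of A: for i in range(1, len(flips)) over state (current_streak, streak_found);
-- 'break' is modelled by the step leaving the state unchanged once streak_found is true.
def check_streak (flips : List String) (streak_length : Int) : Bool :=
  ((PySem.List.pyRange 1 (flips.length : Int) 1).foldl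
    (fun (s : Int × Bool) (i : Int) =>
      if s.2 then s
      else if PySem.List.pyGetD flips i "" == PySem.List.pyGetD flips (i - 1) "" then
        (if s.1 + 1 == streak_length then (s.1 + 1, true) else (s.1 + 1, false))
      else (1, s.2))
    (1, false)).2

-- ===== PORT B =====
-- one step of B's for-loop: 'runs' is a list of (value, length) pairs;
-- 'runs[-1][1] += 1' is dropLast ++ [(last.1, last.2 + 1)].
def bStep (runs : List (String × Int)) (f : String) : List (String × Int) :=
  if decide (runs ≠ []) && (f == (PySem.List.pyGetD runs (-1) ("", 0)).1) then
    runs.dropLast ++ [((PySem.List.pyGetD runs (-1) ("", 0)).1,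
                       (PySem.List.pyGetD runs (-1) ("", 0)).2 + 1)]
  else runs ++ [(f, 1)]

def check_streak_alt (flips : List String) (streak_length : Int) : Bool :=
  (flips.foldl bStep []).any (fun p => decide (streak_length ≤ p.2))

-- ===== PRECONDITION & SPEC =====
-- Pre_ restricts to the function's natural domain: a streak length is a positive count, so
-- Pre_ excludes streak_length ≤ 0 (malformed input, on which A happens to return False and
-- B's run-length test naturally answers True on any non-empty list).
def Pre_check_streak (_flips : List String) (streak_length : Int) : Prop :=
  1 ≤ streak_length
instance (flips : List String) (streak_length : Int) : Decidable (Pre_check_streak flips streak_length) := by unfold Pre_check_streak; infer_instance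
def pvWitness_check_streak : List String × Int := (["H", "H", "T"], 2)

-- For streak_length = 1 with a non-empty list, A always returns False (its counter starts at 1 and
-- only ever tests equality at 2 or more) even though any single flip is a streak of length 1;
-- B returns True, the intended value.
def D_check_streak (flips : List String) (streak_length : Int) : Prop :=
  streak_length = 1 ∧ flips ≠ []
instance (flips : List String) (streak_length : Int) : Decidable (D_check_streak flips streak_length) := by unfold D_check_streak; infer_instance

def Spec_check_streak (flips : List String) (streak_length : Int) (out : Bool) : Prop :=
  ¬ D_check_streak flips streak_length → out = check_streak_alt flips streak_length
instance (flips : List String) (streak_length : Int) (out : Bool) : Decidable (Spec_check_streak flips streak_length out) := by unfold Spec_check_streak; infer_instance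

def pvDiffWitness_check_streak : List String × Int := (["H"], 1)
def pvDiffWitnessOut_check_streak : Bool × Bool := (false, true)

-- ===== CLAIM (what is proved, stated in full; the proofs are below) =====
def Claim_unchanged_check_streak : Prop := ∀ (flips : List String) (streak_length : Int), Dom_check_streak flips streak_length → Pre_check_streak flips streak_length → Spec_check_streak flips streak_length (check_streak flips streak_length)
def Claim_changed_check_streak : Prop := Dom_check_streak (pvDiffWitness_check_streak.1) (pvDiffWitness_check_streak.2) ∧ Pre_check_streak (pvDiffWitness_check_streak.1) (pvDiffWitness_check_streak.2) ∧ D_check_streak (pvDiffWitness_check_streak.1) (pvDiffWitness_check_streak.2) ∧ check_streak (pvDiffWitness_check_streak.1) (pvDiffWitness_check_streak.2) = pvDiffWitnessOut_check_streak.1 ∧ check_streak_alt (pvDiffWitness_check_streak.1) (pvDiffWitness_check_streak.2) = pvDiffWitnessOut_check_streak.2 ∧ pvDiffWitnessOut_check_streak.1 ≠ pvDiffWitnessOut_check_streak.2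
def Claim_exact_check_streak : Prop := ∀ (flips : List String) (streak_length : Int), Dom_check_streak flips streak_length → Pre_check_streak flips streak_length → D_check_streak flips streak_length → check_streak flips streak_length ≠ check_streak_alt flips streak_length

-- ===== LEMMAS AND PROOFS =====

-- length (as Int) of the maximal prefix of l whose elements equal h, plus the remainder
def countRun (h : String) : List String → Int × List String
  | [] => (0, [])
  | x :: xs => if x == h then ((countRun h xs).1 + 1, (countRun h xs).2) else (0, x :: xs)

theorem countRun_snd_length (h : String) (l : List String) : (countRun h l).2.length ≤ l.length := by
  induction l with
  | nil => simp [countRun]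
  | cons x xs ih =>
    by_cases hx : (x == h) = true <;> (simp [countRun, hx]; try omega)

theorem countRun_nonneg (h : String) (l : List String) : 0 ≤ (countRun h l).1 := by
  induction l with
  | nil => simp [countRun]
  | cons x xs ih =>
    by_cases hx : (x == h) = true <;> (simp [countRun, hx]; try omega)

-- the run-length encoding of l (proof-side characterisation)
def runPairs : List String → List (String × Int)
  | [] => []
  | h :: t => (h, (countRun h t).1 + 1) :: runPairs (countRun h t).2
termination_by l => l.length
decreasing_by
  have := countRun_snd_length h t
  simp; omega

-- recursive form of A's loop over (rest of list, previous element)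
def auxS (k : Int) : (Int × Bool) → String → List String → (Int × Bool)
  | s, _, [] => s
  | s, prev, x :: xs =>
      auxS k
        (if s.2 then s
         else if x == prev then
           (if s.1 + 1 == k then (s.1 + 1, true) else (s.1 + 1, false))
         else (1, s.2))
        x xs

-- A's port (fold over range(1, len)) equals the structural recursion auxS
theorem foldA_eq_auxS (k : Int) (xs : List String) :
    ∀ (m j : Nat) (s : Int × Bool), j + m = xs.length → 1 ≤ j →
    (hj : j ≤ xs.length) → (hj1 : j - 1 < xs.length) →
    ((PySem.List.pyRange (j : Int) (xs.length : Int) 1).foldl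
      (fun (s : Int × Bool) (i : Int) =>
        if s.2 then s
        else if PySem.List.pyGetD xs i "" == PySem.List.pyGetD xs (i - 1) "" then
          (if s.1 + 1 == k then (s.1 + 1, true) else (s.1 + 1, false))
        else (1, s.2)) s)
    = auxS k s (xs[j - 1]) (xs.drop j) := by
  intro m
  induction m with
  | zero =>
    intro j s hjm hj1 hjle hj1lt
    have hje : j = xs.length := by omega
    rw [PySem.List.pyRange_one_eq_nil (by exact_mod_cast le_of_eq hje.symm)]
    rw [List.drop_of_length_le (le_of_eq hje.symm)]
    simp [auxS]
  | succ m ih =>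
    intro j s hjm hj1 hjle hj1lt
    have hjlt : j < xs.length := by omega
    rw [PySem.List.pyRange_one_cons (by exact_mod_cast hjlt)]
    rw [List.foldl_cons]
    have hg1 : PySem.List.pyGetD xs (j : Int) "" = xs[j] := by
      rw [PySem.List.pyGetD_natCast]; exact List.getD_eq_getElem xs "" hjlt
    have hg2 : PySem.List.pyGetD xs ((j : Int) - 1) "" = xs[j - 1] := by
      have : (j : Int) - 1 = ((j - 1 : Nat) : Int) := by omega
      rw [this, PySem.List.pyGetD_natCast]; exact List.getD_eq_getElem xs "" hj1lt
    have hdrop : xs.drop j = xs[j] :: xs.drop (j + 1) := (List.getElem_cons_drop hjlt).symm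
    have hcast : (j : Int) + 1 = ((j + 1 : Nat) : Int) := by push_cast; ring
    rw [hg1, hg2, hdrop, hcast]
    rw [ih (j + 1) _ (by omega) (by omega) (by omega) (by omega)]
    rfl

-- once streak_found is true, A's loop state never changes
theorem auxS_true (k : Int) (c : Int) (prev : String) (rest : List String) :
    auxS k (c, true) prev rest = (c, true) := by
  induction rest generalizing prev with
  | nil => rfl
  | cons x xs ih => simp [auxS, ih]

def anyRuns (k : Int) (l : List String) : Bool := (runPairs l).any (fun p => decide (k ≤ p.2))

-- A never finds a streak when streak_length ≤ 1 (current_streak + 1 is always ≥ 2)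
theorem auxS_small (k : Int) (hk : k ≤ 1) (rest : List String) :
    ∀ (prev : String) (cs : Int), 1 ≤ cs → (auxS k (cs, false) prev rest).2 = false := by
  induction rest with
  | nil => intro prev cs _; rfl
  | cons x xs ih =>
    intro prev cs hcs
    by_cases hx : (x == prev) = true
    · have hne : (cs + 1 == k) = false := by
        simp only [beq_eq_false_iff_ne]; omega
      simp only [auxS, hx, hne, if_true, if_false, Bool.false_eq_true]
      exact ih x (cs + 1) (by omega)
    · simp only [auxS, hx, if_false, Bool.false_eq_true]
      exact ih x 1 le_rfl

-- main characterisation of A's loop for streak_length ≥ 2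
theorem auxS_main (k : Int) (hk : 2 ≤ k) (rest : List String) :
    ∀ (prev : String) (cs : Int), 1 ≤ cs → cs < k →
    (auxS k (cs, false) prev rest).2
      = (decide (k ≤ cs + (countRun prev rest).1) || anyRuns k (countRun prev rest).2) := by
  induction rest with
  | nil =>
    intro prev cs hcs hlt
    simp [auxS, countRun, anyRuns, runPairs]
    omega
  | cons x xs ih =>
    intro prev cs hcs hlt
    by_cases hx : (x == prev) = true
    · have hxeq : x = prev := eq_of_beq hx
      by_cases hek : (cs + 1 == k) = true
      · have : cs + 1 = k := by exact_mod_cast eq_of_beq hek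
        simp only [auxS, hx, hek, if_true, Bool.false_eq_true, if_false]
        rw [auxS_true]
        have hnn := countRun_nonneg prev xs
        simp [countRun, hxeq]
        omega
      · have hlt' : cs + 1 < k := by
          have : ¬ cs + 1 = k := by
            intro h; exact absurd (beq_iff_eq.mpr h) (by simp [hek])
          omega
        simp only [auxS, hx, hek, if_true, Bool.false_eq_true, if_false]
        rw [ih x (cs + 1) (by omega) hlt']
        have harith : cs + 1 + (countRun prev xs).1 = cs + ((countRun prev xs).1 + 1) := by ring
        simp only [countRun, hxeq, BEq.rfl, if_true, harith]
    · simp only [auxS, hx, if_false, Bool.false_eq_true]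
      rw [ih x 1 le_rfl (by omega)]
      have hcs0 : ¬ k ≤ cs + (0 : Int) := by omega
      have harith : (1 : Int) + (countRun x xs).1 = (countRun x xs).1 + 1 := by ring
      simp only [countRun, hx, if_false, Bool.false_eq_true, anyRuns, runPairs, List.any_cons,
        harith, hcs0, decide_false, Bool.false_or]

-- B's fold extends the last run or starts a new one: invariant lemma
theorem foldB_inv (xs : List String) :
    ∀ (rs : List (String × Int)) (c : Int) (v : String),
    xs.foldl bStep (rs ++ [(v, c)])
      = rs ++ (v, c + (countRun v xs).1) :: runPairs (countRun v xs).2 := by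
  induction xs with
  | nil => intro rs c v; simp [countRun, runPairs]
  | cons x xs ih =>
    intro rs c v
    by_cases hx : (x == v) = true
    · have hxeq : x = v := eq_of_beq hx
      have hstep : bStep (rs ++ [(v, c)]) x = rs ++ [(v, c + 1)] := by
        simp [bStep, hxeq, PySem.List.pyGetD_neg_one_append_singleton _ _ _]
      rw [List.foldl_cons, hstep, ih]
      simp [countRun, hx]
      ring_nf
    · have hstep : bStep (rs ++ [(v, c)]) x = (rs ++ [(v, c)]) ++ [(x, 1)] := by
        have hget : PySem.List.pyGetD (rs ++ [(v, c)]) (-1) ("", 0) = (v, c) :=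
          PySem.List.pyGetD_neg_one_append_singleton _ _ _
        simp [bStep, hget, hx]
      rw [List.foldl_cons, hstep, ih]
      simp [countRun, hx, runPairs]
      omega
  
-- B's runs list is exactly runPairs flips
theorem foldB_eq_runPairs (flips : List String) :
    flips.foldl bStep [] = runPairs flips := by
  cases flips with
  | nil => simp [runPairs]
  | cons h t =>
    have hstep : bStep ([] : List (String × Int)) h = [(h, 1)] := by
      simp [bStep]
    rw [List.foldl_cons, hstep]
    have := foldB_inv t ([] : List (String × Int)) 1 h
    simp only [List.nil_append] at this
    rw [this]
    simp [runPairs]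
    ring_nf

-- ===== VERDICT (by name: the statement is the Claim_ definition above) =====
theorem check_streak_spec : Claim_unchanged_check_streak := by
  intro flips k _ hpre hnd
  unfold check_streak check_streak_alt
  rw [foldB_eq_runPairs]
  unfold D_check_streak at hnd
  push Not at hnd
  cases flips with
  | nil =>
    rw [PySem.List.pyRange_one_eq_nil (by simp)]
    simp [runPairs]
  | cons h t =>
    have hk : 2 ≤ k := by
      by_contra hk2
      have hk1 : k = 1 := by unfold Pre_check_streak at hpre; omega
      exact absurd (hnd hk1) (by simp)
    have hlen : (1 : Nat) + t.length = (h :: t).length := by simp [Nat.add_comm]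
    have HA := foldA_eq_auxS k (h :: t) t.length 1 (1, false) hlen le_rfl (by simp) (by simp)
    simp only [Nat.cast_one] at HA
    rw [HA]
    simp only [List.drop_one, List.tail_cons, Nat.sub_self, List.getElem_cons_zero]
    rw [auxS_main k hk t h 1 le_rfl (by omega)]
    have : runPairs (h :: t) = (h, (countRun h t).1 + 1) :: runPairs (countRun h t).2 := by
      rw [runPairs]
    rw [this]
    simp only [anyRuns, List.any_cons]
    rw [show (1 : Int) + (countRun h t).1 = (countRun h t).1 + 1 from by ring]

theorem check_streak_changed : Claim_changed_check_streak := by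
  unfold Claim_changed_check_streak; decide

theorem check_streak_tight : Claim_exact_check_streak := by
  intro flips k _ _ hd
  obtain ⟨hk1, hne⟩ := hd
  have hk : k ≤ 1 := le_of_eq hk1
  cases flips with
  | nil => exact absurd rfl hne
  | cons h t =>
    have hA : check_streak (h :: t) k = false := by
      unfold check_streak
      have hlen : (1 : Nat) + t.length = (h :: t).length := by simp [Nat.add_comm]
      have HA := foldA_eq_auxS k (h :: t) t.length 1 (1, false) hlen le_rfl (by simp) (by simp)
      simp only [Nat.cast_one] at HA
      rw [HA]
      simp only [List.drop_one, List.tail_cons, Nat.sub_self, List.getElem_cons_zero]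
      exact auxS_small k hk t h 1 le_rfl
    have hB : check_streak_alt (h :: t) k = true := by
      unfold check_streak_alt
      rw [foldB_eq_runPairs]
      rw [show runPairs (h :: t) = (h, (countRun h t).1 + 1) :: runPairs (countRun h t).2 from by rw [runPairs]]
      have hnn := countRun_nonneg h t
      simp only [List.any_cons, Bool.or_eq_true, decide_eq_true_eq]
      left; omega
    rw [hA, hB]; decide
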